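-- pv_equiv track=rewrite | github.com/studrixlab/design-md | design_md/parser.py | _find_palette_text
-- ===== SOURCE A (Python) =====
-- def _find_palette_text(sections: dict[str, str]) -> str | None:
--     """Locate the palette section body inside a parsed sections dict.
--
--     Args:
--         sections: Mapping returned by :meth:`_split_sections`.
--
--     Returns:
--         Section body text, or ``None`` when no palette-like section exists.
--     """
--     for name, body in sections.items():
--         lower = name.lower()
--         if "color" in lower and ("palette" in lower or "role" in lower):
--             return body
--     # Fallback: any section that mentions "color" in its title.
--     for name, body in sections.items():
--         if "color" in name.lower():
--             return body
--     return None
-- ===== SOURCE B (Python) =====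
-- def _find_palette_text(sections: dict[str, str]) -> str | None:
--     """Single pass: return the first strong match ("color" + "palette"/"role")
--     immediately; otherwise remember the first weak match ("color") as fallback."""
--     fallback = None
--     for name, body in sections.items():
--         lower = name.lower()
--         if "color" in lower:
--             if "palette" in lower or "role" in lower:
--                 return body
--             if fallback is None:
--                 fallback = body
--     return fallback
-- ===== Notes on version B (the rewrite author's own statement) =====
-- stated objective: simpler
-- what changed: Replaced A's two full scans of the dict with one pass that returns a strong match immediately and keeps the first weak match as a fallback.
import Mathlib
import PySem

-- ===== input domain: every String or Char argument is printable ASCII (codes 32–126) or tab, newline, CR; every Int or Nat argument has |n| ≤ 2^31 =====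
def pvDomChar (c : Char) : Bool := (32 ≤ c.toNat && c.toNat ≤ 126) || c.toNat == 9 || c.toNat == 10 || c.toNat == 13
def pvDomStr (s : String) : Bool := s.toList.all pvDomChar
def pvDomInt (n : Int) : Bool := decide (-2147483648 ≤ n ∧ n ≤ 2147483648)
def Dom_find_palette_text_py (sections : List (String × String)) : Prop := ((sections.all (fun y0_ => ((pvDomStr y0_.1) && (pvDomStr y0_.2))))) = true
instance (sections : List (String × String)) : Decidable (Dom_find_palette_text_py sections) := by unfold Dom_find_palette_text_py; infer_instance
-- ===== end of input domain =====

-- B merges A's two scans into one pass with a first-weak-match fallback; same return value (simpler).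
-- ===== PORT A =====
-- first loop of A: first section whose lowered title has "color" and ("palette" or "role")
def pvStrongLoop : List (String × String) → Option String
  | [] => none
  | (name, body) :: rest =>
    let lower := PySem.Str.lower name
    if PySem.Str.isIn "color" lower && (PySem.Str.isIn "palette" lower || PySem.Str.isIn "role" lower) then
      some body
    else pvStrongLoop rest

-- second loop of A: first section whose lowered title has "color"
def pvWeakLoop : List (String × String) → Option String
  | [] => none
  | (name, body) :: rest =>
    if PySem.Str.isIn "color" (PySem.Str.lower name) then some body
    else pvWeakLoop rest

def find_palette_text_py (sections : List (String × String)) : Option String :=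
  match pvStrongLoop sections with
  | some body => some body
  | none => pvWeakLoop sections

-- ===== PORT B =====
-- single pass; fb is the fallback variable (first weak match seen so far)
def pvAltLoop : List (String × String) → Option String → Option String
  | [], fb => fb
  | (name, body) :: rest, fb =>
    let lower := PySem.Str.lower name
    if PySem.Str.isIn "color" lower then
      if PySem.Str.isIn "palette" lower || PySem.Str.isIn "role" lower then some body
      else pvAltLoop rest (if fb.isNone then some body else fb)
    else pvAltLoop rest fb

def find_palette_text_py_alt (sections : List (String × String)) : Option String :=
  pvAltLoop sections none

-- ===== PRECONDITION & SPEC =====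
def Spec_find_palette_text_py (sections : List (String × String)) (out : Option String) : Prop := out = find_palette_text_py_alt sections
instance (sections : List (String × String)) (out : Option String) : Decidable (Spec_find_palette_text_py sections out) := by unfold Spec_find_palette_text_py; infer_instance

-- ===== CLAIM (what is proved, stated in full; the proofs are below) =====
def Claim_equal_find_palette_text_py : Prop := ∀ (sections : List (String × String)), Dom_find_palette_text_py sections → Spec_find_palette_text_py sections (find_palette_text_py sections)

-- ===== LEMMAS AND PROOFS =====

-- ===== VERDICT (by name: the statement is the Claim_ definition above) =====
-- invariant of B's single pass: it is the strong result, else the fallback, else A's weak result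
theorem pvAltLoop_eq (xs : List (String × String)) : ∀ fb : Option String,
    pvAltLoop xs fb =
      match pvStrongLoop xs with
      | some b => some b
      | none => match fb with
        | some v => some v
        | none => pvWeakLoop xs := by
  induction xs with
  | nil => intro fb; cases fb <;> simp only [pvAltLoop, pvStrongLoop, pvWeakLoop]
  | cons hd tl ih =>
    intro fb
    obtain ⟨name, body⟩ := hd
    simp only [pvAltLoop, pvStrongLoop, pvWeakLoop]
    by_cases hc : PySem.Str.isIn "color" (PySem.Str.lower name) = true <;>
      by_cases hs : (PySem.Str.isIn "palette" (PySem.Str.lower name)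
          || PySem.Str.isIn "role" (PySem.Str.lower name)) = true <;>
      simp only [hc, hs, Bool.and_true, Bool.and_false, if_true, ih] <;>
      cases fb <;>
      simp only [Option.isNone_none, Option.isNone_some, if_true] <;>
      cases pvStrongLoop tl <;> rfl

theorem find_palette_text_py_spec : Claim_equal_find_palette_text_py := by
  intro sections _
  unfold Spec_find_palette_text_py find_palette_text_py find_palette_text_py_alt
  rw [pvAltLoop_eq]
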